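-- pv_equiv track=rewrite | github.com/nethoxa/random | parsifal.py | get_assets
-- ===== SOURCE A (Python) =====
-- def get_assets(assets, filter=None):
--
--     new_assets = {}
--     new_assets['github'] = []
--     new_assets['contract'] = []
--     new_assets['other'] = []
--
--     if not assets:
--         return new_assets
--
--     for asset in assets:
--         if filter and filter not in asset['url']:
--             continue
--
--         if 'github' in asset['url']:
--             new_assets['github'].append(asset['url'])
--
--         elif '/0x' in asset['url']:
--             new_assets['contract'].append(asset['url'])
--
--         else:
--             new_assets['other'].append(asset['url'])
--
--     return new_assets
-- ===== SOURCE B (Python) =====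
-- def _partition(xs, pred):
--     yes, no = [], []
--     for x in xs:
--         (yes if pred(x) else no).append(x)
--     return yes, no
--
--
-- def get_assets(assets, filter=None):
--     urls = [a['url'] for a in assets]
--     if filter:
--         urls = [u for u in urls if filter in u]
--     github, rest = _partition(urls, lambda u: 'github' in u)
--     contract, other = _partition(rest, lambda u: '/0x' in u)
--     return {'github': github, 'contract': contract, 'other': other}
-- ===== Notes on version B (the rewrite author's own statement) =====
-- stated objective: alternative
-- what changed: B replaces A's single loop with a three-way elif appending into a mutable dict by two staged binary partitions: extract the (optionally filtered) urls, partition them into github/rest, then partition rest into contract/other; precedence falls out of the staging instead of an elif chain.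
-- outside the precondition, e.g. on get_assets([{}], None): A raises KeyError, B raises KeyError
import Mathlib
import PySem

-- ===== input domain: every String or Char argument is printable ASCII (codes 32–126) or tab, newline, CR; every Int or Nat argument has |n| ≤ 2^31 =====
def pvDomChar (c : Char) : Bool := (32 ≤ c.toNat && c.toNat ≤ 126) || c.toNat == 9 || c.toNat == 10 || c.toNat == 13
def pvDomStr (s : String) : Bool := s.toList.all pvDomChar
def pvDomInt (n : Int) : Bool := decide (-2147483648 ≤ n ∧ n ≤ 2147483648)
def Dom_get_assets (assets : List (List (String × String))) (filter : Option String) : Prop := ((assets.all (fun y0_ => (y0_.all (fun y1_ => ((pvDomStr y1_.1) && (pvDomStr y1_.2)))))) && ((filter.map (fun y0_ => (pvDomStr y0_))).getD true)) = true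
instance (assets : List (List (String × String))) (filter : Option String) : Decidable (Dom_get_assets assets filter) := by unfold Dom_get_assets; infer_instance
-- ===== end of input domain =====

-- B replaces A's single elif loop into a mutable dict by two staged binary partitions
-- (github/rest, then contract/other) over the filtered url list (objective: alternative, same cost).


-- shared Python primitives: asset['url'] (first-match dict lookup; total form, Pre_ guarantees the key)
def urlOf (asset : List (String × String)) : String :=
  ((asset.find? (fun p => p.1 == "url")).map (·.2)).getD ""
-- truthiness of the `filter` argument (None and '' are falsy)
def truthyF (filter : Option String) : Bool :=
  match filter with
  | none => false
  | some s => !(s == "")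

-- ===== PORT A =====
-- one loop appending into a dict initialised with the three empty buckets
def stepA (filter : Option String) (d : PySem.Dict String (List String))
    (asset : List (String × String)) : PySem.Dict String (List String) :=
  let url := urlOf asset
  if truthyF filter && !(PySem.Str.isIn (filter.getD "") url) then d
  else if PySem.Str.isIn "github" url then d.modify "github" [] (· ++ [url])
  else if PySem.Str.isIn "/0x" url then d.modify "contract" [] (· ++ [url])
  else d.modify "other" [] (· ++ [url])

def get_assets (assets : List (List (String × String))) (filter : Option String) : List (String × List String) :=
  let init : PySem.Dict String (List String) :=
    PySem.Dict.mk [("github", []), ("contract", []), ("other", [])]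
  if assets.isEmpty then init.items
  else (assets.foldl (stepA filter) init).items

-- ===== PORT B =====
-- _partition: one loop appending into a yes/no pair
def pypartition (xs : List String) (pred : String → Bool) : List String × List String :=
  xs.foldl (fun acc x => if pred x then (acc.1 ++ [x], acc.2) else (acc.1, acc.2 ++ [x])) ([], [])

-- staged binary partitions of the (optionally filtered) url list
def get_assets_alt (assets : List (List (String × String))) (filter : Option String) : List (String × List String) :=
  let urls := assets.map urlOf
  let urls := if truthyF filter then urls.filter (fun u => PySem.Str.isIn (filter.getD "") u) else urls
  let p1 := pypartition urls (fun u => PySem.Str.isIn "github" u)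
  let p2 := pypartition p1.2 (fun u => PySem.Str.isIn "/0x" u)
  [("github", p1.1), ("contract", p2.1), ("other", p2.2)]

-- ===== PRECONDITION & SPEC =====
-- Pre_ excludes assets lacking a 'url' key, on which Python A raises KeyError.
def Pre_get_assets (assets : List (List (String × String))) (filter : Option String) : Prop :=
  assets.all (fun a => a.any (fun p => p.1 == "url")) = true
instance (assets : List (List (String × String))) (filter : Option String) : Decidable (Pre_get_assets assets filter) := by unfold Pre_get_assets; infer_instance
def pvWitness_get_assets : (List (List (String × String))) × Option String :=
  ([[("url", "https://github.com/x")], [("url", "/0xabc")]], some "x")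

def Spec_get_assets (assets : List (List (String × String))) (filter : Option String) (out : List (String × List String)) : Prop := out = get_assets_alt assets filter
instance (assets : List (List (String × String))) (filter : Option String) (out : List (String × List String)) : Decidable (Spec_get_assets assets filter out) := by unfold Spec_get_assets; infer_instance

-- ===== CLAIM (what is proved, stated in full; the proofs are below) =====
def Claim_equal_get_assets : Prop := ∀ (assets : List (List (String × String))) (filter : Option String), Dom_get_assets assets filter → Pre_get_assets assets filter → Spec_get_assets assets filter (get_assets assets filter)

-- ===== LEMMAS AND PROOFS =====

-- the guard A applies inside its loop
def guardF (filter : Option String) (u : String) : Bool :=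
  !truthyF filter || PySem.Str.isIn (filter.getD "") u

-- the three bucket lists, as filters of the guarded url stream
def bucketG (filter : Option String) (assets : List (List (String × String))) : List String :=
  ((assets.map urlOf).filter (guardF filter)).filter (fun u => PySem.Str.isIn "github" u)
def bucketC (filter : Option String) (assets : List (List (String × String))) : List String :=
  ((assets.map urlOf).filter (guardF filter)).filter
    (fun u => !PySem.Str.isIn "github" u && PySem.Str.isIn "/0x" u)
def bucketO (filter : Option String) (assets : List (List (String × String))) : List String :=
  ((assets.map urlOf).filter (guardF filter)).filter
    (fun u => !PySem.Str.isIn "github" u && !PySem.Str.isIn "/0x" u)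

lemma stepA_eq (filter : Option String) (asset : List (String × String)) (g c o : List String) :
    stepA filter (PySem.Dict.mk [("github", g), ("contract", c), ("other", o)]) asset =
      (if truthyF filter && !(PySem.Str.isIn (filter.getD "") (urlOf asset)) then
        PySem.Dict.mk [("github", g), ("contract", c), ("other", o)]
      else if PySem.Str.isIn "github" (urlOf asset) then
        PySem.Dict.mk [("github", g ++ [urlOf asset]), ("contract", c), ("other", o)]
      else if PySem.Str.isIn "/0x" (urlOf asset) then
        PySem.Dict.mk [("github", g), ("contract", c ++ [urlOf asset]), ("other", o)]
      else PySem.Dict.mk [("github", g), ("contract", c), ("other", o ++ [urlOf asset])]) := by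
  simp only [stepA]
  split_ifs <;>
    simp [PySem.Dict.modify, PySem.Dict.insert, PySem.Dict.getD, PySem.Dict.get?]

-- one step of each bucket list
lemma bucketG_cons (filter : Option String) (a : List (String × String))
    (rest : List (List (String × String))) :
    bucketG filter (a :: rest) =
      (if guardF filter (urlOf a) && PySem.Str.isIn "github" (urlOf a)
        then [urlOf a] else []) ++ bucketG filter rest := by
  simp only [bucketG, List.map_cons, List.filter_cons]
  by_cases hg : guardF filter (urlOf a) = true <;>
    by_cases hp : PySem.Chars.isIn ['g', 'i', 't', 'h', 'u', 'b'] (urlOf a).toList = true <;>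
      simp [hg, hp]

lemma bucketC_cons (filter : Option String) (a : List (String × String))
    (rest : List (List (String × String))) :
    bucketC filter (a :: rest) =
      (if guardF filter (urlOf a) && (!PySem.Str.isIn "github" (urlOf a)
          && PySem.Str.isIn "/0x" (urlOf a)) then [urlOf a] else []) ++ bucketC filter rest := by
  simp only [bucketC, List.map_cons, List.filter_cons]
  by_cases hg : guardF filter (urlOf a) = true <;>
    by_cases hp : PySem.Chars.isIn ['g', 'i', 't', 'h', 'u', 'b'] (urlOf a).toList = true <;>
      by_cases hq : PySem.Chars.isIn ['/', '0', 'x'] (urlOf a).toList = true <;>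
        simp [hg, hp, hq]

lemma bucketO_cons (filter : Option String) (a : List (String × String))
    (rest : List (List (String × String))) :
    bucketO filter (a :: rest) =
      (if guardF filter (urlOf a) && (!PySem.Str.isIn "github" (urlOf a)
          && !PySem.Str.isIn "/0x" (urlOf a)) then [urlOf a] else []) ++ bucketO filter rest := by
  simp only [bucketO, List.map_cons, List.filter_cons]
  by_cases hg : guardF filter (urlOf a) = true <;>
    by_cases hp : PySem.Chars.isIn ['g', 'i', 't', 'h', 'u', 'b'] (urlOf a).toList = true <;>
      by_cases hq : PySem.Chars.isIn ['/', '0', 'x'] (urlOf a).toList = true <;>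
        simp [hg, hp, hq]

-- when A's `continue` guard does not fire, the url passes the filter guard
lemma guard_of_not (filter : Option String) (u : String)
    (h1 : ¬(truthyF filter && !PySem.Str.isIn (filter.getD "") u) = true) :
    guardF filter u = true := by
  rcases Bool.eq_false_or_eq_true (truthyF filter) with h | h
  · simp only [Bool.and_eq_true, Bool.not_eq_true'] at h1
    have hin : PySem.Str.isIn (filter.getD "") u = true := by
      by_contra hn
      exact h1 ⟨h, by simpa using hn⟩
    simp only [guardF, h, Bool.not_true, Bool.false_or]
    simpa using hin
  · simp [guardF, h]

lemma fold_shape (filter : Option String) (assets : List (List (String × String))) :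
    ∀ (g c o : List String),
    (assets.foldl (stepA filter) (PySem.Dict.mk [("github", g), ("contract", c), ("other", o)])).items
      = [("github", g ++ bucketG filter assets),
         ("contract", c ++ bucketC filter assets),
         ("other", o ++ bucketO filter assets)] := by
  induction assets with
  | nil => intro g c o; simp [bucketG, bucketC, bucketO]
  | cons a rest ih =>
    intro g c o
    simp only [List.foldl_cons]
    rw [stepA_eq]
    split_ifs with h1 h2 h3
    · have hg : guardF filter (urlOf a) = false := by
        obtain ⟨ht, hin⟩ := Bool.and_eq_true _ _ |>.mp h1
        simp only [Bool.not_eq_true'] at hin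
        simp only [guardF, ht, Bool.not_true, Bool.false_or]
        simpa using hin
      rw [ih, bucketG_cons, bucketC_cons, bucketO_cons]
      simp [hg]
    · have hg := guard_of_not filter (urlOf a) h1
      simp only [PySem.Str.isIn_eq] at h2
      simp at h2
      rw [ih, bucketG_cons, bucketC_cons, bucketO_cons]
      simp [hg, h2]
    · have hg := guard_of_not filter (urlOf a) h1
      simp only [PySem.Str.isIn_eq] at h2 h3
      simp at h2 h3
      rw [ih, bucketG_cons, bucketC_cons, bucketO_cons]
      simp [hg, h2, h3]
    · have hg := guard_of_not filter (urlOf a) h1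
      simp only [PySem.Str.isIn_eq] at h2 h3
      simp at h2 h3
      rw [ih, bucketG_cons, bucketC_cons, bucketO_cons]
      simp [hg, h2, h3]

-- the partition loop computes the two filters
lemma pypartition_eq (xs : List String) (pred : String → Bool) :
    pypartition xs pred = (xs.filter pred, xs.filter (fun x => !pred x)) := by
  have gen : ∀ (y n : List String),
      xs.foldl (fun acc x => if pred x then (acc.1 ++ [x], acc.2) else (acc.1, acc.2 ++ [x])) (y, n)
        = (y ++ xs.filter pred, n ++ xs.filter (fun x => !pred x)) := by
    induction xs with
    | nil => intro y n; simp
    | cons x rest ih =>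
      intro y n
      simp only [List.foldl_cons]
      by_cases h : pred x = true <;> simp [h, ih]
  simpa using gen [] []

-- filters commute: second-stage partition of the rest = the conjunction filter
lemma filter_swap (p q : String → Bool) (L : List String) :
    (L.filter q).filter p = L.filter (fun u => q u && p u) := by
  rw [List.filter_filter]
  exact List.filter_congr (fun u _ => Bool.and_comm _ _)

-- B's output, expressed with the same bucket lists
lemma alt_shape (assets : List (List (String × String))) (filter : Option String) :
    get_assets_alt assets filter
      = [("github", bucketG filter assets),
         ("contract", bucketC filter assets),
         ("other", bucketO filter assets)] := by
  have hurls : (if truthyF filter then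
        (assets.map urlOf).filter (fun u => PySem.Str.isIn (filter.getD "") u)
      else assets.map urlOf) = (assets.map urlOf).filter (guardF filter) := by
    by_cases h : truthyF filter = true
    · simp only [h, if_true]
      exact List.filter_congr (fun u _ => by simp [guardF, h])
    · simp only [Bool.not_eq_true] at h
      simp only [h, Bool.false_eq_true, if_false]
      exact (List.filter_eq_self.mpr (fun u _ => by simp [guardF, h])).symm
  simp only [get_assets_alt, hurls, pypartition_eq]
  simp only [bucketG, bucketC, bucketO, filter_swap, Bool.and_assoc]

-- ===== VERDICT (by name: the statement is the Claim_ definition above) =====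
theorem get_assets_spec : Claim_equal_get_assets := by
  intro assets filter _hdom _hpre
  unfold Spec_get_assets
  rw [alt_shape]
  unfold get_assets
  cases assets with
  | nil => simp [bucketG, bucketC, bucketO]
  | cons a rest =>
    simp only [List.isEmpty_cons, if_neg (by simp : ¬ false = true)]
    exact fold_shape filter (a :: rest) [] [] []
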